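-- pv_equiv track=rewrite | github.com/flavorfan/MyLeetCode | 332.reconstruct-itinerary.py | makeAdjMap
-- ===== SOURCE A (Python) =====
-- def makeAdjMap(tickets):
--     adjMap = {}
--     for ticket in tickets:
--         if ticket[0] not in adjMap:
--             adjMap[ticket[0]] = [ticket[1]]
--         else:
--             adjMap[ticket[0]].append(ticket[1])
--     for ticket in tickets:
--         adjMap[ticket[0]].sort(reverse=True)
--     return adjMap
-- ===== SOURCE B (Python) =====
-- def makeAdjMap(tickets):
--     adjMap = {t[0]: [] for t in tickets}
--     for t in sorted(tickets, key=lambda t: t[1], reverse=True):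
--         adjMap[t[0]].append(t[1])
--     return adjMap
-- ===== Notes on version B (the rewrite author's own statement) =====
-- stated objective: simpler
-- what changed: B sorts the whole ticket list once by destination (descending) and builds the adjacency map in one grouping pass, replacing A's group-first pass plus a second pass that re-sorts each source's list once per ticket of that source.
import Mathlib
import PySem

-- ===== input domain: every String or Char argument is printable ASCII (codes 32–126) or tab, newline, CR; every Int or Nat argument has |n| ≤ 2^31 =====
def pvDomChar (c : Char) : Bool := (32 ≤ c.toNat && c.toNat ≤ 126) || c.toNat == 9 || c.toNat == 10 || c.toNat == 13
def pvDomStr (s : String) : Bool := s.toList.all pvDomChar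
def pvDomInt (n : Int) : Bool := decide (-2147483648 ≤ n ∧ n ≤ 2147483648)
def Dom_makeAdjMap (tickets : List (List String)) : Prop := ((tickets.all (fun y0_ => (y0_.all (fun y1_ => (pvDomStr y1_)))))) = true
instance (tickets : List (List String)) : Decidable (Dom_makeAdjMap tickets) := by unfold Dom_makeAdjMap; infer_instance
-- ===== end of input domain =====

-- B sorts the ticket list once by destination (descending) and groups in a single pass,
-- replacing A's group-then-re-sort-each-group-per-ticket two-loop shape; objective: simpler.

-- ===== PORT A =====
-- ticket[i] in total form; exact under Pre_makeAdjMap (every ticket has length ≥ 2, so indices 0, 1 are in range)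
def pvTicketGet (t : List String) (i : Nat) : String := t.getD i ""

def makeAdjMap (tickets : List (List String)) : List (String × List String) :=
  -- first loop: group destinations by source, in ticket order;
  -- second loop: for every ticket, sort that ticket's source list with sort(reverse=True)
  (tickets.foldl (fun d ticket =>
      d.modify (pvTicketGet ticket 0) [] (fun l => PySem.List.sorted l (fun x => x) true))
    (tickets.foldl (fun d ticket =>
      if d.contains (pvTicketGet ticket 0) = false then
        d.insert (pvTicketGet ticket 0) [pvTicketGet ticket 1]
      else
        d.modify (pvTicketGet ticket 0) [] (fun l => l ++ [pvTicketGet ticket 1]))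
      PySem.Dict.empty)).items

-- ===== PORT B =====
def makeAdjMap_alt (tickets : List (List String)) : List (String × List String) :=
  -- adjMap = {t[0]: [] for t in tickets}, then
  -- for t in sorted(tickets, key=lambda t: t[1], reverse=True): adjMap[t[0]].append(t[1])
  ((PySem.List.sorted tickets (fun t => pvTicketGet t 1) true).foldl
      (fun d t => d.modify (pvTicketGet t 0) [] (fun l => l ++ [pvTicketGet t 1]))
    (tickets.foldl (fun d t => d.insert (pvTicketGet t 0) []) PySem.Dict.empty)).items

-- ===== PRECONDITION & SPEC =====
-- Pre_ excludes exactly the inputs where Python A raises IndexError: a ticket with fewer than two entries.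
def Pre_makeAdjMap (tickets : List (List String)) : Prop := ∀ t ∈ tickets, 2 ≤ t.length
instance (tickets : List (List String)) : Decidable (Pre_makeAdjMap tickets) := by unfold Pre_makeAdjMap; infer_instance
def pvWitness_makeAdjMap : List (List String) := [["JFK", "SFO"], ["JFK", "ATL"], ["SFO", "ATL"]]

def Spec_makeAdjMap (tickets : List (List String)) (out : List (String × List String)) : Prop := out = makeAdjMap_alt tickets
instance (tickets : List (List String)) (out : List (String × List String)) : Decidable (Spec_makeAdjMap tickets out) := by unfold Spec_makeAdjMap; infer_instance

-- ===== CLAIM (what is proved, stated in full; the proofs are below) =====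
def Claim_equal_makeAdjMap : Prop := ∀ (tickets : List (List String)), Dom_makeAdjMap tickets → Pre_makeAdjMap tickets → Spec_makeAdjMap tickets (makeAdjMap tickets)

-- ===== LEMMAS AND PROOFS =====


theorem pv_contains_mkmap (X : List String) (v : String → List String) (s : String) :
    (PySem.Dict.mk (X.map fun k => (k, v k))).contains s = decide (s ∈ X) := by
  show (X.map fun k => (k, v k)).any (fun p => p.1 == s) = decide (s ∈ X)
  rw [List.any_map]
  by_cases h : s ∈ X
  · simp only [decide_eq_true h, List.any_eq_true, Function.comp]
    exact ⟨s, h, by simp⟩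
  · simp only [decide_eq_false h, List.any_eq_false, Function.comp]
    intro k hk
    simp only [beq_iff_eq]
    exact fun hks => h (hks ▸ hk)

theorem pv_getD_mkmap (X : List String) (v : String → List String) (s : String)
    (hX : X.Nodup) (hs : s ∈ X) :
    (PySem.Dict.mk (X.map fun k => (k, v k))).getD s [] = v s := by
  apply PySem.Dict.getD_of_mem_items
  · exact List.mem_map_of_mem hs
  · show ((X.map fun k => (k, v k)).map Prod.fst).Nodup
    simpa [List.map_map, Function.comp_def] using hX

theorem pv_insert_mkmap_mem (X : List String) (v : String → List String) (s : String)
    (hs : s ∈ X) (w : List String) :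
    (PySem.Dict.mk (X.map fun k => (k, v k))).insert s w
      = PySem.Dict.mk (X.map fun k => (k, if k = s then w else v k)) := by
  have hc : (PySem.Dict.mk (X.map fun k => (k, v k))).contains s = true := by
    rw [pv_contains_mkmap]; exact decide_eq_true hs
  rw [PySem.Dict.insert, hc]
  simp only [reduceIte]
  congr 1
  rw [List.map_map]
  apply List.map_congr_left
  intro k _
  by_cases h : k = s <;> simp [Function.comp, h]

theorem pv_insert_mkmap_new (X : List String) (v : String → List String) (s : String)
    (hs : s ∉ X) (w : List String) :
    (PySem.Dict.mk (X.map fun k => (k, v k))).insert s w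
      = PySem.Dict.mk ((X ++ [s]).map fun k => (k, if k = s then w else v k)) := by
  have hc : (PySem.Dict.mk (X.map fun k => (k, v k))).contains s = false := by
    rw [pv_contains_mkmap]; exact decide_eq_false hs
  rw [PySem.Dict.insert, hc]
  simp only [Bool.false_eq_true, reduceIte]
  congr 1
  rw [List.map_append]
  congr 1
  · apply List.map_congr_left
    intro k hk
    have : k ≠ s := fun h => hs (h ▸ hk)
    simp [this]
  · simp

theorem pv_modify_mkmap_mem (X : List String) (v : String → List String) (s : String)
    (hX : X.Nodup) (hs : s ∈ X) (f : List String → List String) :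
    (PySem.Dict.mk (X.map fun k => (k, v k))).modify s [] f
      = PySem.Dict.mk (X.map fun k => (k, if k = s then f (v k) else v k)) := by
  rw [PySem.Dict.modify, pv_getD_mkmap X v s hX hs, pv_insert_mkmap_mem X v s hs]
  congr 1
  apply List.map_congr_left
  intro k _
  by_cases h : k = s <;> simp [h]

theorem pv_set_add_mem (X : List String) (s : String) (hs : s ∈ X) :
    PySem.Set.add X s = X := by
  simp [PySem.Set.add, hs]

theorem pv_set_add_new (X : List String) (s : String) (hs : s ∉ X) :
    PySem.Set.add X s = X ++ [s] := by
  simp [PySem.Set.add, hs]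

theorem pv_nodup_snoc (X : List String) (s : String) (hX : X.Nodup) (hs : s ∉ X) :
    (X ++ [s]).Nodup := by
  refine hX.append (List.nodup_singleton _) ?_
  intro a ha hb
  rw [List.mem_singleton] at hb
  exact hs (hb ▸ ha)

theorem pv_loopA1 (L : List (List String)) : ∀ (X : List String) (v : String → List String),
    X.Nodup → (∀ k, k ∉ X → v k = []) →
    L.foldl (fun d ticket =>
        if d.contains (pvTicketGet ticket 0) = false then
          d.insert (pvTicketGet ticket 0) [pvTicketGet ticket 1]
        else
          d.modify (pvTicketGet ticket 0) [] (fun l => l ++ [pvTicketGet ticket 1]))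
      (PySem.Dict.mk (X.map fun k => (k, v k)))
    = PySem.Dict.mk ((PySem.Set.update X (L.map fun t => pvTicketGet t 0)).map
        (fun k => (k, v k ++ (L.filter (fun t => pvTicketGet t 0 == k)).map fun t => pvTicketGet t 1))) := by
  induction L with
  | nil => intro X v hX hv; simp [PySem.Set.update]
  | cons t L ih =>
    intro X v hX hv
    rw [List.foldl_cons]
    by_cases hs : pvTicketGet t 0 ∈ X
    · have hc : (PySem.Dict.mk (X.map fun k => (k, v k))).contains (pvTicketGet t 0) = true := by
        rw [pv_contains_mkmap]; exact decide_eq_true hs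
      rw [hc]
      simp only [Bool.true_eq_false, reduceIte]
      rw [pv_modify_mkmap_mem X v _ hX hs]
      rw [ih X _ hX (fun k hk => by
        have hks : k ≠ pvTicketGet t 0 := fun h => hk (h ▸ hs)
        simp [hks, hv k hk])]
      have hupd : PySem.Set.update X ((t :: L).map fun t => pvTicketGet t 0)
          = PySem.Set.update X (L.map fun t => pvTicketGet t 0) := by
        simp [PySem.Set.update, pv_set_add_mem X _ hs]
      rw [hupd]
      congr 1
      apply List.map_congr_left
      intro a _
      by_cases h : pvTicketGet t 0 = a
      · subst h; simp [List.filter_cons]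
      · simp [List.filter_cons, h, Ne.symm h]
    · have hc : (PySem.Dict.mk (X.map fun k => (k, v k))).contains (pvTicketGet t 0) = false := by
        rw [pv_contains_mkmap]; exact decide_eq_false hs
      rw [hc]
      simp only [reduceIte]
      rw [pv_insert_mkmap_new X v _ hs [pvTicketGet t 1]]
      have hX' : (X ++ [pvTicketGet t 0]).Nodup := pv_nodup_snoc X _ hX hs
      rw [ih (X ++ [pvTicketGet t 0]) _ hX' (fun k hk => by
        have h1 : k ∉ X := fun h => hk (List.mem_append_left _ h)
        have h2 : k ≠ pvTicketGet t 0 := fun h => hk (by simp [h])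
        simp [h2, hv k h1])]
      have hupd : PySem.Set.update X ((t :: L).map fun t => pvTicketGet t 0)
          = PySem.Set.update (X ++ [pvTicketGet t 0]) (L.map fun t => pvTicketGet t 0) := by
        simp [PySem.Set.update, pv_set_add_new X _ hs]
      rw [hupd]
      congr 1
      apply List.map_congr_left
      intro a _
      by_cases h : pvTicketGet t 0 = a
      · subst h; simp [List.filter_cons, hv _ hs]
      · simp [List.filter_cons, h, Ne.symm h]

theorem pv_loopA2 (L : List (List String)) : ∀ (X : List String) (v : String → List String),
    X.Nodup → (∀ t ∈ L, pvTicketGet t 0 ∈ X) →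
    L.foldl (fun d ticket =>
        d.modify (pvTicketGet ticket 0) [] (fun l => PySem.List.sorted l (fun x => x) true))
      (PySem.Dict.mk (X.map fun k => (k, v k)))
    = PySem.Dict.mk (X.map fun k =>
        (k, if k ∈ L.map (fun t => pvTicketGet t 0) then PySem.List.sorted (v k) (fun x => x) true else v k)) := by
  induction L with
  | nil => intro X v hX _; simp
  | cons t L ih =>
    intro X v hX hL
    rw [List.foldl_cons, pv_modify_mkmap_mem X v _ hX (hL t List.mem_cons_self),
      ih X _ hX (fun u hu => hL u (List.mem_cons_of_mem _ hu))]
    congr 1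
    apply List.map_congr_left
    intro k _
    by_cases h1 : k = pvTicketGet t 0
    · by_cases h2 : k ∈ L.map (fun t => pvTicketGet t 0) <;>
        simp [h1, h2, PySem.List.sorted_rev_sorted_rev]
    · by_cases h2 : k ∈ L.map (fun t => pvTicketGet t 0) <;>
        simp [h1, h2, Ne.symm h1]

theorem pv_loopB1 (L : List (List String)) : ∀ (X : List String), X.Nodup →
    L.foldl (fun d t => d.insert (pvTicketGet t 0) [])
      (PySem.Dict.mk (X.map fun k => (k, ([] : List String))))
    = PySem.Dict.mk ((PySem.Set.update X (L.map fun t => pvTicketGet t 0)).map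
        (fun k => (k, ([] : List String)))) := by
  induction L with
  | nil => intro X hX; simp [PySem.Set.update]
  | cons t L ih =>
    intro X hX
    rw [List.foldl_cons]
    by_cases hs : pvTicketGet t 0 ∈ X
    · rw [pv_insert_mkmap_mem X _ _ hs]
      have h1 : (X.map fun k => (k, if k = pvTicketGet t 0 then ([] : List String) else []))
          = X.map fun k => (k, ([] : List String)) := by
        apply List.map_congr_left; intro a _; simp
      rw [h1, ih X hX]
      have hupd : PySem.Set.update X ((t :: L).map fun t => pvTicketGet t 0)
          = PySem.Set.update X (L.map fun t => pvTicketGet t 0) := by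
        simp [PySem.Set.update, pv_set_add_mem X _ hs]
      rw [hupd]
    · rw [pv_insert_mkmap_new X _ _ hs]
      have h1 : ((X ++ [pvTicketGet t 0]).map fun k => (k, if k = pvTicketGet t 0 then ([] : List String) else []))
          = (X ++ [pvTicketGet t 0]).map fun k => (k, ([] : List String)) := by
        apply List.map_congr_left; intro a _; simp
      rw [h1, ih (X ++ [pvTicketGet t 0]) (pv_nodup_snoc X _ hX hs)]
      have hupd : PySem.Set.update X ((t :: L).map fun t => pvTicketGet t 0)
          = PySem.Set.update (X ++ [pvTicketGet t 0]) (L.map fun t => pvTicketGet t 0) := by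
        simp [PySem.Set.update, pv_set_add_new X _ hs]
      rw [hupd]

theorem pv_loopB2 (L : List (List String)) : ∀ (X : List String) (v : String → List String),
    X.Nodup → (∀ t ∈ L, pvTicketGet t 0 ∈ X) →
    L.foldl (fun d t => d.modify (pvTicketGet t 0) [] (fun l => l ++ [pvTicketGet t 1]))
      (PySem.Dict.mk (X.map fun k => (k, v k)))
    = PySem.Dict.mk (X.map fun k =>
        (k, v k ++ (L.filter (fun t => pvTicketGet t 0 == k)).map fun t => pvTicketGet t 1)) := by
  induction L with
  | nil => intro X v hX _; simp
  | cons t L ih =>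
    intro X v hX hL
    rw [List.foldl_cons, pv_modify_mkmap_mem X v _ hX (hL t List.mem_cons_self),
      ih X _ hX (fun u hu => hL u (List.mem_cons_of_mem _ hu))]
    congr 1
    apply List.map_congr_left
    intro k _
    by_cases h : pvTicketGet t 0 = k
    · subst h; simp [List.filter_cons]
    · simp [List.filter_cons, h, Ne.symm h]

theorem pv_sort_filter (tickets : List (List String)) (k : String) :
    PySem.List.sorted ((tickets.filter (fun t => pvTicketGet t 0 == k)).map fun t => pvTicketGet t 1) (fun x => x) true
    = ((PySem.List.sorted tickets (fun t => pvTicketGet t 1) true).filter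
        (fun t => pvTicketGet t 0 == k)).map fun t => pvTicketGet t 1 := by
  apply List.eq_of_perm_of_sorted (le := fun a b : String => b ≤ a)
  · intro a b _ _ h1 h2; exact le_antisymm h2 h1
  · exact PySem.List.sorted_pairwise_rev _ (fun x => x)
  · have h := PySem.List.sorted_pairwise_rev tickets (fun t => pvTicketGet t 1)
    have h2 : ((PySem.List.sorted tickets (fun t => pvTicketGet t 1) true).filter
        (fun t => pvTicketGet t 0 == k)).Pairwise (fun a b => pvTicketGet b 1 ≤ pvTicketGet a 1) :=
      h.sublist List.filter_sublist
    exact (List.pairwise_map).mpr h2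
  · have p1 : (PySem.List.sorted ((tickets.filter (fun t => pvTicketGet t 0 == k)).map fun t => pvTicketGet t 1) (fun x => x) true).Perm
        ((tickets.filter (fun t => pvTicketGet t 0 == k)).map fun t => pvTicketGet t 1) :=
      PySem.List.sorted_perm _ _ _
    have p2 : ((PySem.List.sorted tickets (fun t => pvTicketGet t 1) true).filter
        (fun t => pvTicketGet t 0 == k)).Perm (tickets.filter (fun t => pvTicketGet t 0 == k)) :=
      (PySem.List.sorted_perm tickets (fun t => pvTicketGet t 1) true).filter _
    exact p1.trans (p2.map _).symm

-- ===== VERDICT (by name: the statement is the Claim_ definition above) =====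
theorem makeAdjMap_spec : Claim_equal_makeAdjMap := by
  intro tickets _ _
  unfold Spec_makeAdjMap makeAdjMap makeAdjMap_alt
  have hempty : (PySem.Dict.empty : PySem.Dict String (List String))
      = PySem.Dict.mk (([] : List String).map fun k => (k, ([] : List String))) := rfl
  have hnodup : (PySem.Set.ofList (tickets.map fun t => pvTicketGet t 0)).Nodup :=
    PySem.Set.nodup_ofList _
  have hupd : PySem.Set.update ([] : List String) (tickets.map fun t => pvTicketGet t 0)
      = PySem.Set.ofList (tickets.map fun t => pvTicketGet t 0) := rfl
  have hmem : ∀ t ∈ tickets, pvTicketGet t 0 ∈ PySem.Set.ofList (tickets.map fun t => pvTicketGet t 0) := by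
    intro t ht
    exact (PySem.Set.mem_ofList _ _).mpr (List.mem_map_of_mem ht)
  rw [hempty, pv_loopA1 tickets [] (fun _ => []) List.nodup_nil (fun _ _ => rfl), hupd,
    pv_loopA2 tickets _ _ hnodup hmem]
  rw [pv_loopB1 tickets [] List.nodup_nil, hupd,
    pv_loopB2 _ _ _ hnodup (fun t ht =>
      hmem t ((PySem.List.mem_sorted tickets (fun t => pvTicketGet t 1) true t).mp ht))]
  show (_ : List (String × List String)) = _
  congr 2
  apply List.map_congr_left
  intro k hk
  have hk' : k ∈ tickets.map fun t => pvTicketGet t 0 := (PySem.Set.mem_ofList _ _).mp hk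
  simp only [hk', if_pos, List.nil_append]
  exact congrArg (fun l => (k, l)) (pv_sort_filter tickets k)
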